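-- pv_equiv track=rewrite | github.com/maxkuttner/AOC2024 | Dec9/puzzle2/solution.py | find_free_spans_upto
-- ===== SOURCE A (Python) =====
-- def find_free_spans_upto(a, fid):
--     """Finds contiguous spans of free space (.) in the array."""
--     spans = []
--     start = None
--
--     for i, block in enumerate(a):
--         if block == fid:
--             break
--         if block == '.':
--             if start is None:
--                 start = i
--         else:
--             if start is not None:
--                 spans.append((start, i - start))
--                 start = None
--     return spans
-- ===== SOURCE B (Python) =====
-- def find_free_spans_upto(a, fid):
--     """Finds contiguous spans of free space (.) in the array."""
--     try:
--         cutoff = a.index(fid)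
--     except ValueError:
--         cutoff = len(a)
--     prefix = a[:cutoff]
--     # run-length group the prefix by whether the block is free space
--     runs = []
--     j = 0
--     while j < len(prefix):
--         k = j
--         while k < len(prefix) and (prefix[k] == '.') == (prefix[j] == '.'):
--             k += 1
--         runs.append((j, k - j, prefix[j] == '.'))
--         j = k
--     # every free run except the last run (which ends at fid / array end) is a span
--     return [(s, n) for s, n, free in runs[:-1] if free]
-- ===== Notes on version B (the rewrite author's own statement) =====
-- stated objective: alternative
-- what changed: Replaces A's single stateful scan (Optional start register, break) by a three-phase decomposition: truncate at the first fid via list.index + slice, run-length group the prefix into (start, length, is_free) runs, then emit every free run except the last.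
import Mathlib
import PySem

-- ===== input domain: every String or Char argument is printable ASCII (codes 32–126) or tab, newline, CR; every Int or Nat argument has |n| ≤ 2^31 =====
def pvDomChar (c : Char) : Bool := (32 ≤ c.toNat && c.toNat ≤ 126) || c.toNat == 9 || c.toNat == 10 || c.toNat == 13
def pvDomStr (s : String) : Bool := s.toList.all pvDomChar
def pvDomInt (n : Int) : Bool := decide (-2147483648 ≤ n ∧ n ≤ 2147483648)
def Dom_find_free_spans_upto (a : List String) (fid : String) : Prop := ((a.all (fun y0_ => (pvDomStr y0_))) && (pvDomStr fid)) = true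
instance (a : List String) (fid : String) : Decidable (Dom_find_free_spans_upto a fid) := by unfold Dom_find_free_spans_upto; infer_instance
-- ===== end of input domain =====

-- B re-decomposes A's stateful scan as truncate-at-fid, run-length group, drop-last-run filter; objective: alternative (same cost).

-- ===== PORT A =====
-- the for-loop of A: state = (index i, start register, accumulated spans); 'break' returns spans
def ffsLoop (fid : String) : List String → Int → Option Int → List (Int × Int) → List (Int × Int)
  | [], _, _, spans => spans
  | b :: rest, i, start, spans =>
    if b = fid then spans
    else if b = "." then
      ffsLoop fid rest (i + 1) (match start with | none => some i | some s => some s) spans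
    else
      match start with
      | some s => ffsLoop fid rest (i + 1) none (spans ++ [(s, i - s)])
      | none => ffsLoop fid rest (i + 1) none spans

def find_free_spans_upto (a : List String) (fid : String) : List (Int × Int) :=
  ffsLoop fid a 0 none []

-- ===== PORT B =====
-- the two nested while loops of Source B: each outer step scans the current run (inner while = takeWhile
-- on "same key as prefix[j]") and records (start, length, is_free), then continues after the run
def ffsRuns : List String → Int → List (Int × Int × Bool)
  | [], _ => []
  | b :: rest, j =>
    let d := b == "."
    let grp := rest.takeWhile (fun x => (x == ".") == d)
    (j, ((1 + grp.length : Nat) : Int), d) :: ffsRuns (rest.drop grp.length) (j + 1 + (grp.length : Int))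
termination_by l => l.length
decreasing_by simp

-- the final comprehension: runs[:-1], keep free runs
def ffsEmit (rs : List (Int × Int × Bool)) : List (Int × Int) :=
  rs.dropLast.filterMap (fun t => if t.2.2 then some (t.1, t.2.1) else none)

def find_free_spans_upto_alt (a : List String) (fid : String) : List (Int × Int) :=
  let cutoff : Int := match PySem.List.index? a fid with
    | some k => (k : Int)
    | none => (a.length : Int)
  let pre := PySem.List.slice a none (some cutoff)
  ffsEmit (ffsRuns pre 0)

-- ===== PRECONDITION & SPEC =====
def Spec_find_free_spans_upto (a : List String) (fid : String) (out : List (Int × Int)) : Prop := out = find_free_spans_upto_alt a fid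
instance (a : List String) (fid : String) (out : List (Int × Int)) : Decidable (Spec_find_free_spans_upto a fid out) := by unfold Spec_find_free_spans_upto; infer_instance

-- ===== CLAIM (what is proved, stated in full; the proofs are below) =====
def Claim_equal_find_free_spans_upto : Prop := ∀ (a : List String) (fid : String), Dom_find_free_spans_upto a fid → Spec_find_free_spans_upto a fid (find_free_spans_upto a fid)

-- ===== LEMMAS AND PROOFS =====

theorem dropWhile_eq_drop_len_takeWhile (l : List String) (p : String → Bool) :
    l.dropWhile p = l.drop (l.takeWhile p).length := by
  induction l with
  | nil => simp
  | cons b m ih => by_cases h : p b <;> simp [h, ih]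

-- one-step unfolding of ffsRuns on a cons
theorem ffsRuns_cons (b : String) (rest : List String) (j : Int) :
    ffsRuns (b :: rest) j =
      (j, ((1 + (rest.takeWhile (fun x => (x == ".") == (b == "."))).length : Nat) : Int), (b == ".")) ::
      ffsRuns (rest.drop (rest.takeWhile (fun x => (x == ".") == (b == "."))).length)
        (j + 1 + ((rest.takeWhile (fun x => (x == ".") == (b == "."))).length : Int)) := by
  rw [ffsRuns]

theorem ffs_take_index (a : List String) (fid : String) :
    a.take ((PySem.List.index? a fid).getD a.length) = a.takeWhile (fun x => !(x == fid)) := by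
  induction a with
  | nil => simp
  | cons b rest ih =>
    by_cases hb : b = fid
    · subst hb; rw [PySem.List.index?_cons_self]; simp
    · rw [PySem.List.index?_cons_of_ne rest hb]
      cases h : PySem.List.index? rest fid with
      | some k =>
        rw [h] at ih
        simp only [Option.getD_some] at ih
        simp [hb, ih]
      | none =>
        rw [h] at ih
        simp only [Option.getD_none, List.take_length] at ih
        simp [hb, ← ih]

-- the prefix Source B slices off is exactly the takeWhile-before-fid prefix A scans
theorem ffs_prefix_eq (a : List String) (fid : String) :
    PySem.List.slice a none (some (match PySem.List.index? a fid with
      | some k => (k : Int) | none => (a.length : Int))) =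
    a.takeWhile (fun x => !(x == fid)) := by
  cases h : PySem.List.index? a fid with
  | some k =>
    rw [PySem.List.slice_to_natCast]
    have := ffs_take_index a fid
    rw [h] at this
    simpa using this
  | none =>
    rw [PySem.List.slice_to_natCast]
    have := ffs_take_index a fid
    rw [h] at this
    simpa using this

theorem ffsRuns_ne_nil (m : List String) (j : Int) (hm : m ≠ []) :
    ffsRuns m j ≠ [] := by
  cases m with
  | nil => exact absurd rfl hm
  | cons b rest => rw [ffsRuns_cons]; simp

theorem ffsEmit_cons_false (j n : Int) (rs : List (Int × Int × Bool)) :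
    ffsEmit ((j, n, false) :: rs) = ffsEmit rs := by
  cases rs <;> simp [ffsEmit]

theorem ffsEmit_cons_true (j n : Int) (rs : List (Int × Int × Bool)) (h : rs ≠ []) :
    ffsEmit ((j, n, true) :: rs) = (j, n) :: ffsEmit rs := by
  cases rs with
  | nil => exact absurd rfl h
  | cons r rs' => simp [ffsEmit]

-- skipping a maximal non-free run at the front does not change the emitted spans
theorem ffs_skip_nondots (m : List String) (j : Int) :
    ffsEmit (ffsRuns m j) =
    ffsEmit (ffsRuns (m.dropWhile (fun x => !(x == "."))) (j + ((m.takeWhile (fun x => !(x == "."))).length : Int))) := by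
  cases m with
  | nil => simp
  | cons b m' =>
    by_cases hb : (b == ".") = true
    · simp [hb]
    · rw [Bool.not_eq_true] at hb
      rw [ffsRuns_cons, hb]
      rw [ffsEmit_cons_false]
      have hpred : (fun x => ((x == ".") == false)) = (fun x : String => !(x == ".")) := by
        funext x; simp
      rw [hpred]
      rw [List.dropWhile_cons, List.takeWhile_cons]
      simp only [hb, Bool.not_false, if_pos, ite_true]
      rw [dropWhile_eq_drop_len_takeWhile]
      congr 2
      simp only [List.length_cons]
      push_cast
      ring

-- unfolding lemmas for A's loop on a cons
theorem ffsLoop_cons_fid (fid b : String) (rest : List String) (i : Int) (st : Option Int)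
    (spans : List (Int × Int)) (h : b = fid) : ffsLoop fid (b :: rest) i st spans = spans := by
  simp [ffsLoop, h]

theorem ffsLoop_cons_dot_none (fid b : String) (rest : List String) (i : Int)
    (spans : List (Int × Int)) (hf : ¬ b = fid) (hd : b = ".") :
    ffsLoop fid (b :: rest) i none spans = ffsLoop fid rest (i + 1) (some i) spans := by
  subst hd; simp [ffsLoop, hf]

theorem ffsLoop_cons_dot_some (fid b : String) (rest : List String) (i s : Int)
    (spans : List (Int × Int)) (hf : ¬ b = fid) (hd : b = ".") :
    ffsLoop fid (b :: rest) i (some s) spans = ffsLoop fid rest (i + 1) (some s) spans := by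
  subst hd; simp [ffsLoop, hf]

theorem ffsLoop_cons_other_none (fid b : String) (rest : List String) (i : Int)
    (spans : List (Int × Int)) (hf : ¬ b = fid) (hd : ¬ b = ".") :
    ffsLoop fid (b :: rest) i none spans = ffsLoop fid rest (i + 1) none spans := by
  simp [ffsLoop, hf, hd]

theorem ffsLoop_cons_other_some (fid b : String) (rest : List String) (i s : Int)
    (spans : List (Int × Int)) (hf : ¬ b = fid) (hd : ¬ b = ".") :
    ffsLoop fid (b :: rest) i (some s) spans = ffsLoop fid rest (i + 1) none (spans ++ [(s, i - s)]) := by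
  simp [ffsLoop, hf, hd]
theorem ffs_peel (b : String) (m : List String) (j : Int) (hb : (b == ".") = false) :
    ffsEmit (ffsRuns (b :: m) j) = ffsEmit (ffsRuns m (j + 1)) := by
  rw [ffs_skip_nondots (b :: m) j, ffs_skip_nondots m (j + 1)]
  rw [List.dropWhile_cons, List.takeWhile_cons]
  simp only [hb, Bool.not_false, ite_true]
  congr 2
  simp only [List.length_cons]
  push_cast
  ring

theorem ffs_main (fid : String) (l : List String) : ∀ (i : Int) (spans : List (Int × Int)),
    (ffsLoop fid l i none spans = spans ++ ffsEmit (ffsRuns (l.takeWhile (fun x => !(x == fid))) i))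
    ∧ ∀ s : Int, ffsLoop fid l i (some s) spans = spans ++
      (let tl := l.takeWhile (fun x => !(x == fid));
       let d := tl.takeWhile (fun x => x == ".");
       let r := tl.dropWhile (fun x => x == ".");
       if r = [] then []
       else (s, (i + (d.length : Int)) - s) :: ffsEmit (ffsRuns r (i + (d.length : Int)))) := by
  induction l with
  | nil =>
    intro i spans
    refine ⟨by simp [ffsLoop, ffsEmit, ffsRuns], fun s => by simp [ffsLoop, ffsEmit, ffsRuns]⟩
  | cons b rest ih =>
    intro i spans
    by_cases hfid : b = fid
    · constructor
      · rw [ffsLoop_cons_fid fid b rest i none spans hfid]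
        simp [ffsEmit, ffsRuns, hfid]
      · intro s
        rw [ffsLoop_cons_fid fid b rest i (some s) spans hfid]
        simp [ffsEmit, ffsRuns, hfid]
    · by_cases hdot : b = "."
      · subst hdot
        have hf : (("." : String) == fid) = false := by simp [hfid]
        constructor
        · rw [ffsLoop_cons_dot_none fid "." rest i spans hfid rfl]
          rw [(ih (i + 1) spans).2 i]
          simp only [List.takeWhile_cons, hf, Bool.not_false, ite_true]
          congr 1
          rw [ffsRuns_cons]
          have hpred : (fun x => ((x == ".") == (("." : String) == "."))) = (fun x : String => (x == ".")) := by
            funext x; simp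
          rw [hpred]
          simp only [beq_self_eq_true]
          set tl' := rest.takeWhile (fun x => !(x == fid)) with htl
          set d' := tl'.takeWhile (fun x => x == ".") with hd
          have hdrop : tl'.drop d'.length = tl'.dropWhile (fun x => x == ".") := by
            rw [dropWhile_eq_drop_len_takeWhile]
          rw [hdrop]
          by_cases hr : tl'.dropWhile (fun x => x == ".") = []
          · rw [hr]
            simp [ffsEmit, ffsRuns]
          · rw [if_neg hr]
            rw [ffsEmit_cons_true _ _ _ (ffsRuns_ne_nil _ _ hr)]
            have h1 : ((1 + d'.length : Nat) : Int) = i + 1 + (d'.length : Int) - i := by push_cast; ring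
            rw [h1]
        · intro s
          rw [ffsLoop_cons_dot_some fid "." rest i s spans hfid rfl]
          rw [(ih (i + 1) spans).2 s]
          simp only [List.takeWhile_cons, List.dropWhile_cons, hf, Bool.not_false, ite_true,
            beq_self_eq_true, List.length_cons]
          congr 1
          have harith : i + 1 + ((rest.takeWhile (fun x => !(x == fid))).takeWhile (fun x => x == ".")).length =
              i + (((rest.takeWhile (fun x => !(x == fid))).takeWhile (fun x => x == ".")).length + 1 : Int) := by
            ring
          push_cast
          rw [harith]
      · have hf : ((b : String) == fid) = false := by simp [hfid]
        have hd2 : ((b : String) == ".") = false := by simp [hdot]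
        constructor
        · rw [ffsLoop_cons_other_none fid b rest i spans hfid hdot]
          rw [(ih (i + 1) spans).1]
          simp only [List.takeWhile_cons, hf, Bool.not_false, ite_true]
          rw [ffs_peel b _ i hd2]
        · intro s
          rw [ffsLoop_cons_other_some fid b rest i s spans hfid hdot]
          rw [(ih (i + 1) (spans ++ [(s, i - s)])).1]
          simp only [List.takeWhile_cons, List.dropWhile_cons, hf, hd2, Bool.not_false, ite_true,
            ite_false, List.append_assoc, List.singleton_append]
          congr 1
          by_cases hr : (b :: rest.takeWhile (fun x => !(x == fid))) = []
          · exact absurd hr (by simp)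
          · rw [if_neg (by simp)]
            simp only [Bool.false_eq_true, if_false, List.length_nil, Nat.cast_zero, add_zero]
            rw [ffs_peel b _ i hd2]
  
-- ===== VERDICT (by name: the statement is the Claim_ definition above) =====
theorem find_free_spans_upto_spec : Claim_equal_find_free_spans_upto := by
  intro a fid _
  show find_free_spans_upto a fid = find_free_spans_upto_alt a fid
  simp only [find_free_spans_upto, find_free_spans_upto_alt]
  rw [ffs_prefix_eq]
  simpa using (ffs_main fid a 0 []).1
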